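-- pv_equiv track=rewrite | github.com/andyashall/sorting-algorithms | shell.py | gapInsertion
-- ===== SOURCE A (Python) =====
-- def gapInsertion(l, s, e):
--   for n in range(s+e, len(l), e):
--     c = l[n]
--     p = n
--     while p >= e and l[p-e] > c:
--       l[p] = l[p-e]
--       p = p-e
--     l[p] = c
--   return l
-- ===== SOURCE B (Python) =====
-- def gapInsertion(l, s, e):
--   idx = list(range(s, len(l), e))
--   vals = sorted(l[i] for i in idx)
--   for i, v in zip(idx, vals):
--     l[i] = v
--   return l
-- ===== Notes on version B (the rewrite author's own statement) =====
-- stated objective: simpler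
-- what changed: Replaces A's in-place gapped insertion sort (inner shifting while-loop per element) with a gather / library-sort / scatter over the same gapped index subsequence.
-- outside the precondition, e.g. on gapInsertion([1, 2, 3], -2, 1): A returns [1, 2, 3], B returns [2, 3, 3]; on gapInsertion([5, 1, 0], 1, 1): A returns [0, 5, 1], B returns [5, 0, 1]; on gapInsertion([1, 2, 3], 4, -1): A returns [1, 2, 3], B raises IndexError
import Mathlib
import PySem

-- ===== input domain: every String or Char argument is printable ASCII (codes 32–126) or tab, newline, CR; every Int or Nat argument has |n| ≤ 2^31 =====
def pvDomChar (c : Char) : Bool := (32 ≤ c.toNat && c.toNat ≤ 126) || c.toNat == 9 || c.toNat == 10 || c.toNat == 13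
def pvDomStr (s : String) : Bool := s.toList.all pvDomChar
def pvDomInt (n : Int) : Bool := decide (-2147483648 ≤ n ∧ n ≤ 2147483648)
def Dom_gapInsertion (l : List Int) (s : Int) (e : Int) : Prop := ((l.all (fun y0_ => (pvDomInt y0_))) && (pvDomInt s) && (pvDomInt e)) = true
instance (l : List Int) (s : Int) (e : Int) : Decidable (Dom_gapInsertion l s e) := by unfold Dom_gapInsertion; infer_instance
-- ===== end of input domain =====

-- B replaces A's in-place gapped insertion-shifting with gather / library-sort / scatter over the
-- same gapped positions (objective: simpler); both Pythons mutate l in place to the same final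
-- content, and the equivalence proved here is about the returned list's value.

-- ===== PORT A =====
-- inner 'while p >= e and l[p-e] > c' loop; fuel only guards totality (on Pre_ it never runs out)
def gapInnerA (e c : Int) : Nat → Int → List Int → List Int × Int
  | 0, p, a => (a, p)
  | fuel + 1, p, a =>
    if e ≤ p ∧ c < PySem.List.pyGetD a (p - e) 0 then
      gapInnerA e c fuel (p - e) (PySem.List.pySetD a p (PySem.List.pyGetD a (p - e) 0))
    else (a, p)

def gapInsertion (l : List Int) (s : Int) (e : Int) : List Int :=
  (PySem.List.pyRange (s + e) (l.length : Int) e).foldl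
    (fun a n =>
      let c := PySem.List.pyGetD a n 0
      let r := gapInnerA e c (a.length + 1) n a
      PySem.List.pySetD r.1 r.2 c) l

-- ===== PORT B =====
def gapInsertion_alt (l : List Int) (s : Int) (e : Int) : List Int :=
  let idx := PySem.List.pyRange s (l.length : Int) e
  let vals := PySem.List.sorted (idx.map (fun i => PySem.List.pyGetD l i 0)) (fun x => x) false
  (idx.zip vals).foldl (fun a iv => PySem.List.pySetD a iv.1 iv.2) l

-- ===== PRECONDITION & SPEC =====
-- Pre_ keeps the shell-sort contract 0 ≤ s < e (plus the regions where the pass is trivially empty: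
-- positive gap with s past the end, or a non-positive gap with s ≤ len l, where both loops run zero
-- iterations).  It excludes: e = 0 (both Pythons raise ValueError); negative s (Python's
-- negative-index wraparound makes A's result a defensible accident B does not reproduce); e ≤ s
-- with s inside the list (A's 'p >= e' guard then walks below s and sorts extra off-grid elements —
-- an out-of-contract corner where A's and B's values are both defensible); and negative e with
-- s > len l (A's loop is empty but B's index range hits an IndexError).
def Pre_gapInsertion (l : List Int) (s : Int) (e : Int) : Prop :=
  (0 ≤ s ∧ 1 ≤ e ∧ (s < e ∨ (l.length : Int) ≤ s)) ∨ (e ≤ -1 ∧ s ≤ (l.length : Int))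
instance (l : List Int) (s : Int) (e : Int) : Decidable (Pre_gapInsertion l s e) := by
  unfold Pre_gapInsertion; infer_instance

def pvWitness_gapInsertion : List Int × Int × Int := ([5, 1, 4, 2, 3], 1, 2)

def Spec_gapInsertion (l : List Int) (s : Int) (e : Int) (out : List Int) : Prop := out = gapInsertion_alt l s e
instance (l : List Int) (s : Int) (e : Int) (out : List Int) : Decidable (Spec_gapInsertion l s e out) := by unfold Spec_gapInsertion; infer_instance

-- ===== CLAIM (what is proved, stated in full; the proofs are below) =====
def Claim_equal_gapInsertion : Prop := ∀ (l : List Int) (s : Int) (e : Int), Dom_gapInsertion l s e → Pre_gapInsertion l s e → Spec_gapInsertion l s e (gapInsertion l s e)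

-- ===== LEMMAS AND PROOFS =====

-- Nat-level model of the gapped positions s, s+e, s+2e, …
def posP (sn en k : Nat) : Nat := sn + k * en

-- values of l at the first t gapped positions
def gatherL (l : List Int) (sn en t : Nat) : List Int :=
  (List.range t).map (fun k => l.getD (posP sn en k) 0)

-- insert c into a descending list, scanning from the front (= A's while loop, seen from the top)
def insRev (c : Int) : List Int → List Int
  | [] => [c]
  | x :: xs => if c < x then x :: insRev c xs else c :: x :: xs

-- descending insertion sort built from insRev
def sortR (v : List Int) : List Int := v.foldl (fun w x => insRev x w) []

-- Nat model of one outer iteration of A (inner while loop + final write), at position index j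
def insStep (sn en : Nat) (a : List Int) (c : Int) : Nat → List Int
  | 0 => a.set (posP sn en 0) c
  | j + 1 =>
    if c < a.getD (posP sn en j) 0 then
      insStep sn en (a.set (posP sn en (j + 1)) (a.getD (posP sn en j) 0)) c j
    else a.set (posP sn en (j + 1)) c

-- Nat model of A's outer loop after m iterations (outer indices 1..m)
def passA (sn en : Nat) (l : List Int) : Nat → List Int
  | 0 => l
  | m + 1 =>
    let a := passA sn en l m
    insStep sn en a (a.getD (posP sn en (m + 1)) 0) (m + 1)

-- Nat model of B's scatter loop
def scat (a : List Int) : List Nat → List Int → List Int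
  | [], _ => a
  | _ :: _, [] => a
  | k :: ks, v :: vs => scat (a.set k v) ks vs

-- ---- basic getD/set facts ----
theorem getD_set_self (a : List Int) (i : Nat) (v d : Int) (h : i < a.length) :
    (a.set i v).getD i d = v := by
  simp [List.getD_eq_getElem?_getD, h]

theorem getD_set_ne (a : List Int) (i j : Nat) (v d : Int) (h : i ≠ j) :
    (a.set i v).getD j d = a.getD j d := by
  simp [List.getD_eq_getElem?_getD, List.getElem?_set_ne h]

-- ---- posP ----
theorem posP_zero (sn en : Nat) : posP sn en 0 = sn := by simp [posP]

theorem posP_lt_posP (sn en : Nat) (hen : 1 ≤ en) {t u : Nat} (h : t < u) :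
    posP sn en t < posP sn en u := by
  have : t * en < u * en := Nat.mul_lt_mul_of_pos_right h (by omega)
  simp only [posP]; omega

theorem posP_ne (sn en : Nat) (hen : 1 ≤ en) {t u : Nat} (h : t ≠ u) :
    posP sn en t ≠ posP sn en u := by
  rcases Nat.lt_or_ge t u with h' | h'
  · exact Nat.ne_of_lt (posP_lt_posP sn en hen h')
  · exact (Nat.ne_of_lt (posP_lt_posP sn en hen (by omega))).symm

-- ---- gatherL ----
theorem gatherL_succ (l : List Int) (sn en t : Nat) :
    gatherL l sn en (t + 1) = gatherL l sn en t ++ [l.getD (posP sn en t) 0] := by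
  simp [gatherL, List.range_succ]

theorem length_gatherL (l : List Int) (sn en t : Nat) : (gatherL l sn en t).length = t := by
  simp [gatherL]

theorem gatherL_set_high (a : List Int) (sn en : Nat) (hen : 1 ≤ en) (t j : Nat) (v : Int)
    (h : t ≤ j) : gatherL (a.set (posP sn en j) v) sn en t = gatherL a sn en t := by
  unfold gatherL
  refine List.map_congr_left ?_
  intro k hk
  have hk' : k < t := List.mem_range.mp hk
  exact getD_set_ne _ _ _ _ _ (posP_ne sn en hen (by omega))

-- ---- insRev : permutation and order ----
theorem insRev_perm (c : Int) (w : List Int) : (insRev c w).Perm (c :: w) := by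
  induction w with
  | nil => simp [insRev]
  | cons x xs ih =>
    by_cases h : c < x
    · simpa [insRev, h] using ((ih.cons x).trans (List.Perm.swap c x xs))
    · simp [insRev, h]

theorem mem_insRev {y c : Int} {w : List Int} (h : y ∈ insRev c w) : y = c ∨ y ∈ w := by
  have := (insRev_perm c w).mem_iff.mp h
  simpa using this

theorem insRev_desc (c : Int) (w : List Int) (hw : w.Pairwise (fun a b => b ≤ a)) :
    (insRev c w).Pairwise (fun a b => b ≤ a) := by
  induction w with
  | nil => simp [insRev]
  | cons x xs ih =>
    rcases List.pairwise_cons.mp hw with ⟨hx, hxs⟩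
    by_cases h : c < x
    · rw [insRev, if_pos h]
      refine List.pairwise_cons.mpr ⟨?_, ih hxs⟩
      intro y hy
      rcases mem_insRev hy with rfl | hy'
      · omega
      · exact hx y hy'
    · rw [insRev, if_neg h]
      refine List.pairwise_cons.mpr ⟨?_, hw⟩
      intro y hy
      rcases List.mem_cons.mp hy with rfl | hy'
      · omega
      · have := hx y hy'; omega

theorem foldl_insRev_perm (v : List Int) : ∀ w : List Int,
    (v.foldl (fun w x => insRev x w) w).Perm (v ++ w) := by
  induction v with
  | nil => intro w; simp
  | cons x v ih =>
    intro w
    have h1 : ((x :: v).foldl (fun w x => insRev x w) w)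
        = v.foldl (fun w x => insRev x w) (insRev x w) := by simp
    rw [h1]
    refine (ih _).trans ((List.Perm.append_left v (insRev_perm x w)).trans ?_)
    exact List.perm_middle.trans (by simp)

theorem sortR_perm (v : List Int) : (sortR v).Perm v := by
  simpa using foldl_insRev_perm v []

theorem foldl_insRev_desc (v : List Int) : ∀ w : List Int,
    w.Pairwise (fun a b => b ≤ a) →
    (v.foldl (fun w x => insRev x w) w).Pairwise (fun a b => b ≤ a) := by
  induction v with
  | nil => intro w hw; simpa using hw
  | cons x v ih =>
    intro w hw
    simpa using ih (insRev x w) (insRev_desc x w hw)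

theorem sortR_desc (v : List Int) : (sortR v).Pairwise (fun a b => b ≤ a) := by
  simpa [sortR] using foldl_insRev_desc v [] (by simp)

theorem sortR_append_singleton (v : List Int) (x : Int) :
    sortR (v ++ [x]) = insRev x (sortR v) := by
  simp [sortR]

theorem sorted_eq_sortR_reverse (v : List Int) :
    PySem.List.sorted v (fun x => x) false = (sortR v).reverse := by
  refine PySem.List.sorted_id_eq_of_perm_of_pairwise v ((sortR v).reverse) ?_ ?_
  · exact (List.reverse_perm _).trans (sortR_perm v)
  · exact List.pairwise_reverse.mpr (sortR_desc v)

-- ---- insStep : what one outer iteration of A does ----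
theorem length_insStep (sn en : Nat) (c : Int) : ∀ (j : Nat) (a : List Int),
    (insStep sn en a c j).length = a.length := by
  intro j
  induction j with
  | zero => intro a; simp [insStep]
  | succ j ih =>
    intro a
    unfold insStep
    split <;> simp [ih]

theorem insStep_getD_untouched (sn en : Nat) (c : Int) : ∀ (j : Nat) (a : List Int) (i : Nat),
    (∀ t, t ≤ j → i ≠ posP sn en t) → (insStep sn en a c j).getD i 0 = a.getD i 0 := by
  intro j
  induction j with
  | zero =>
    intro a i hi
    exact getD_set_ne _ _ _ _ _ (fun h => hi 0 (by omega) h.symm)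
  | succ j ih =>
    intro a i hi
    unfold insStep
    by_cases h : c < a.getD (posP sn en j) 0
    · simp only [h, if_true]
      rw [ih _ _ (fun t ht => hi t (by omega))]
      exact getD_set_ne _ _ _ _ _ (fun h' => hi (j + 1) (by omega) h'.symm)
    · simp only [h, if_false]
      exact getD_set_ne _ _ _ _ _ (fun h' => hi (j + 1) (by omega) h'.symm)

theorem insStep_gather (sn en : Nat) (hen : 1 ≤ en) (c : Int) : ∀ (j : Nat) (a : List Int),
    posP sn en j < a.length →
    (gatherL (insStep sn en a c j) sn en (j + 1)).reverse
      = insRev c ((gatherL a sn en j).reverse) := by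
  intro j
  induction j with
  | zero =>
    intro a ha
    rw [gatherL_succ]
    simp only [gatherL, List.range_zero, List.map_nil, List.nil_append, List.reverse_singleton,
      insStep]
    rw [getD_set_self _ _ _ _ ha]
    rfl
  | succ j ih =>
    intro a ha
    have hlt : posP sn en j < posP sn en (j + 1) := posP_lt_posP sn en hen (by omega)
    unfold insStep
    by_cases h : c < a.getD (posP sn en j) 0
    · simp only [h, if_true]
      set v := a.getD (posP sn en j) 0 with hv
      set a' := a.set (posP sn en (j + 1)) v with ha'
      have hlen' : a'.length = a.length := by simp [ha']
      rw [gatherL_succ, List.reverse_append]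
      have htop : (insStep sn en a' c j).getD (posP sn en (j + 1)) 0 = v := by
        rw [insStep_getD_untouched sn en c j a' _ (fun t ht => posP_ne sn en hen (by omega))]
        exact getD_set_self _ _ _ _ (by omega)
      rw [htop]
      rw [ih a' (by omega)]
      rw [gatherL_set_high a sn en hen j (j + 1) v (by omega)]
      rw [gatherL_succ, List.reverse_append]
      simp only [List.reverse_singleton, List.singleton_append]
      rw [insRev, if_pos h]
    · simp only [h, if_false]
      rw [gatherL_succ (a.set (posP sn en (j + 1)) c) sn en (j + 1), List.reverse_append]
      rw [gatherL_set_high a sn en hen (j + 1) (j + 1) c (by omega)]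
      rw [getD_set_self _ _ _ _ ha]
      rw [gatherL_succ a sn en j, List.reverse_append]
      simp only [List.reverse_singleton, List.singleton_append]
      rw [insRev, if_neg h]

-- ---- passA : the invariant of A's outer loop ----
theorem length_passA (sn en : Nat) (l : List Int) : ∀ m, (passA sn en l m).length = l.length := by
  intro m
  induction m with
  | zero => simp [passA]
  | succ m ih => simp [passA, length_insStep, ih]

theorem passA_invariant (sn en : Nat) (hen : 1 ≤ en) (l : List Int) : ∀ m,
    (∀ k, k ≤ m → posP sn en k < l.length) →
    (gatherL (passA sn en l m) sn en (m + 1)).reverse = sortR (gatherL l sn en (m + 1))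
    ∧ (∀ i, (∀ t, t ≤ m → i ≠ posP sn en t) → (passA sn en l m).getD i 0 = l.getD i 0) := by
  intro m
  induction m with
  | zero =>
    intro _
    constructor
    · simp [passA, gatherL, sortR, insRev]
    · intro i hi; simp [passA]
  | succ m ih =>
    intro hpos
    obtain ⟨ih1, ih2⟩ := ih (fun k hk => hpos k (by omega))
    have hc : (passA sn en l m).getD (posP sn en (m + 1)) 0 = l.getD (posP sn en (m + 1)) 0 :=
      ih2 _ (fun t ht => (posP_ne sn en hen (by omega)))
    constructor
    · show (gatherL (insStep sn en (passA sn en l m)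
        ((passA sn en l m).getD (posP sn en (m + 1)) 0) (m + 1)) sn en (m + 2)).reverse = _
      rw [insStep_gather sn en hen _ (m + 1) _ (by rw [length_passA]; exact hpos (m + 1) (by omega))]
      rw [ih1, hc]
      rw [gatherL_succ l sn en (m + 1), sortR_append_singleton]
    · intro i hi
      show (insStep sn en (passA sn en l m) _ (m + 1)).getD i 0 = _
      rw [insStep_getD_untouched sn en _ (m + 1) _ i (fun t ht => hi t (by omega))]
      exact ih2 i (fun t ht => hi t (by omega))

-- ---- scat : what B's write-back loop does ----
theorem length_scat : ∀ (ks : List Nat) (vs a : List Int), (scat a ks vs).length = a.length := by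
  intro ks
  induction ks with
  | nil => intro vs a; cases vs <;> simp [scat]
  | cons k ks ih =>
    intro vs a
    cases vs with
    | nil => simp [scat]
    | cons v vs => simp [scat, ih]

theorem scat_getD_not_mem : ∀ (ks : List Nat) (vs a : List Int) (i : Nat), i ∉ ks →
    (scat a ks vs).getD i 0 = a.getD i 0 := by
  intro ks
  induction ks with
  | nil => intro vs a i _; cases vs <;> simp [scat]
  | cons k ks ih =>
    intro vs a i hi
    cases vs with
    | nil => simp [scat]
    | cons v vs =>
      have h1 : i ∉ ks := fun hm => hi (List.mem_cons_of_mem _ hm)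
      have h2 : k ≠ i := fun hm => hi (hm ▸ List.mem_cons_self ..)
      rw [scat, ih vs (a.set k v) i h1]
      exact getD_set_ne _ _ _ _ _ h2

theorem scat_getD_elem : ∀ (ks : List Nat) (vs a : List Int), ks.Nodup →
    ks.length ≤ vs.length → ∀ (j : Nat) (hj : j < ks.length), ks[j] < a.length →
    (scat a ks vs).getD ks[j] 0 = vs.getD j 0 := by
  intro ks
  induction ks with
  | nil => intro vs a _ _ j hj; simp at hj
  | cons k ks ih =>
    intro vs a hnd hlen j hj hin
    cases vs with
    | nil => simp at hlen
    | cons v vs =>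
      rcases List.nodup_cons.mp hnd with ⟨hk, hnd'⟩
      cases j with
      | zero =>
        rw [scat]
        simp only [List.getElem_cons_zero] at hin ⊢
        rw [scat_getD_not_mem ks vs _ k hk, getD_set_self _ _ _ _ hin]
        rfl
      | succ j =>
        rw [scat]
        simp only [List.getElem_cons_succ]
        rw [ih vs _ hnd' (by simpa using hlen) j (by simpa using hj) (by simpa using hin)]
        simp

-- ---- bridging the Int-level ports to the Nat-level models ----
theorem posP_le_self (sn en : Nat) (hen : 1 ≤ en) (k : Nat) : k ≤ posP sn en k := by
  have : k * 1 ≤ k * en := Nat.mul_le_mul_left k hen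
  simp only [posP]; omega

theorem posP_injective (sn en : Nat) (hen : 1 ≤ en) : Function.Injective (posP sn en) := by
  intro t u h
  by_contra hne
  exact posP_ne sn en hen hne h

theorem innerA_eq_insStep (sn en : Nat) (hen : 1 ≤ en) (hse : sn < en) (c : Int) :
    ∀ (j : Nat) (fuel : Nat) (a : List Int), posP sn en j < a.length → j + 1 ≤ fuel →
    (let r := gapInnerA (en : Int) c fuel ((posP sn en j : Nat) : Int) a
     PySem.List.pySetD r.1 r.2 c) = insStep sn en a c j := by
  intro j
  induction j with
  | zero =>
    intro fuel a hlen hfuel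
    match fuel, hfuel with
    | fuel + 1, _ =>
      dsimp only
      rw [gapInnerA, if_neg (fun hc => by
        have h1 := hc.1
        simp only [posP_zero] at h1
        omega)]
      rw [PySem.List.pySetD_natCast, insStep]
  | succ j ih =>
    intro fuel a hlen hfuel
    match fuel, hfuel with
    | fuel + 1, hf =>
      dsimp only
      rw [gapInnerA]
      have hidx : ((posP sn en (j + 1) : Nat) : Int) - (en : Int) = ((posP sn en j : Nat) : Int) := by
        simp only [posP]; push_cast; ring
      rw [hidx, PySem.List.pyGetD_natCast]
      have hguard : ((en : Int) ≤ ((posP sn en (j + 1) : Nat) : Int)) := by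
        have : en ≤ posP sn en (j + 1) := by
          have : 1 * en ≤ (j + 1) * en := Nat.mul_le_mul_right en (by omega)
          simp only [posP]; omega
        exact_mod_cast this
      by_cases h : c < a.getD (posP sn en j) 0
      · rw [if_pos ⟨hguard, h⟩, PySem.List.pySetD_natCast]
        have hlt : posP sn en j < posP sn en (j + 1) := posP_lt_posP sn en hen (by omega)
        have := ih fuel (a.set (posP sn en (j + 1)) (a.getD (posP sn en j) 0))
          (by simp; omega) (by omega)
        dsimp only at this
        rw [this, insStep, if_pos h]
      · rw [if_neg (fun hc => h hc.2), PySem.List.pySetD_natCast, insStep, if_neg h]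

theorem foldA_eq_passA (sn en : Nat) (hen : 1 ≤ en) (hse : sn < en) (l : List Int) :
    ∀ m, (∀ k, k < m → posP sn en (k + 1) < l.length) →
    ((List.range m).map (fun k => ((posP sn en (k + 1) : Nat) : Int))).foldl
      (fun a n =>
        let c := PySem.List.pyGetD a n 0
        let r := gapInnerA (en : Int) c (a.length + 1) n a
        PySem.List.pySetD r.1 r.2 c) l = passA sn en l m := by
  intro m
  induction m with
  | zero => intro _; simp [passA]
  | succ m ih =>
    intro hpos
    rw [List.range_succ, List.map_append, List.foldl_append]
    rw [ih (fun k hk => hpos k (by omega))]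
    simp only [List.map_cons, List.map_nil, List.foldl_cons, List.foldl_nil]
    rw [PySem.List.pyGetD_natCast, length_passA]
    have hposL : posP sn en (m + 1) < l.length := hpos m (by omega)
    have hfuel : m + 1 + 1 ≤ l.length + 1 + 1 := by
      have := posP_le_self sn en hen (m + 1); omega
    have hbig : (m + 1) + 1 ≤ l.length + 1 := by
      have := posP_le_self sn en hen (m + 1); omega
    have := innerA_eq_insStep sn en hen hse ((passA sn en l m).getD (posP sn en (m + 1)) 0)
      (m + 1) (l.length + 1) (passA sn en l m) (by rw [length_passA]; exact hposL) hbig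
    dsimp only at this
    rw [this]
    rfl

theorem foldB_eq_scat : ∀ (ks : List Nat) (vs : List Int) (a : List Int),
    ((ks.map (fun k : Nat => (k : Int))).zip vs).foldl
      (fun a iv => PySem.List.pySetD a iv.1 iv.2) a = scat a ks vs := by
  intro ks
  induction ks with
  | nil => intro vs a; cases vs <;> rfl
  | cons k ks ih =>
    intro vs a
    cases vs with
    | nil =>
      simp only [List.zip_nil_right, List.foldl_nil]
      rw [scat]
    | cons v vs =>
      have hstep : (((k :: ks).map (fun k : Nat => (k : Int))).zip (v :: vs)).foldl
          (fun a iv => PySem.List.pySetD a iv.1 iv.2) a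
          = ((ks.map (fun k : Nat => (k : Int))).zip vs).foldl
            (fun a iv => PySem.List.pySetD a iv.1 iv.2) (PySem.List.pySetD a (k : Int) v) := rfl
      rw [hstep, PySem.List.pySetD_natCast, ih vs (a.set k v), scat]

-- the two index ranges, in the main case s < len l
theorem ranges_eq (sn en L : Nat) (hen : 1 ≤ en) (hsL : sn < L) :
    ∃ N : Nat, 1 ≤ N ∧
      PySem.List.pyRange (sn : Int) (L : Int) (en : Int)
        = (List.range N).map (fun k => ((posP sn en k : Nat) : Int)) ∧
      PySem.List.pyRange ((sn : Int) + (en : Int)) (L : Int) (en : Int)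
        = (List.range (N - 1)).map (fun k => ((posP sn en (k + 1) : Nat) : Int)) ∧
      (∀ k, k < N → posP sn en k < L) := by
  have hepos : (0 : Int) < (en : Int) := by exact_mod_cast hen
  refine ⟨(((L : Int) - (sn : Int) + (en : Int) - 1) / (en : Int)).toNat, ?_, ?_, ?_, ?_⟩
  case _ =>
    have h1 : (1 : Int) ≤ ((L : Int) - (sn : Int) + (en : Int) - 1) / (en : Int) := by
      rw [Int.le_ediv_iff_mul_le hepos]; omega
    omega
  case _ =>
    rw [PySem.List.pyRange_of_pos _ _ hepos, if_pos (by exact_mod_cast hsL)]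
    apply List.map_congr_left
    intro k _
    simp only [posP]; push_cast; ring
  case _ =>
    rw [PySem.List.pyRange_of_pos _ _ hepos]
    by_cases hc : (sn : Int) + (en : Int) < (L : Int)
    · rw [if_pos hc]
      have hnum : ((L : Int) - ((sn : Int) + (en : Int)) + (en : Int) - 1)
          = (L : Int) - (sn : Int) - 1 := by ring
      have hnum2 : ((L : Int) - (sn : Int) + (en : Int) - 1)
          = ((L : Int) - (sn : Int) - 1) + 1 * (en : Int) := by ring
      have hdiv : ((L : Int) - (sn : Int) + (en : Int) - 1) / (en : Int)
          = ((L : Int) - (sn : Int) - 1) / (en : Int) + 1 := by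
        rw [hnum2, Int.add_mul_ediv_right _ _ (by omega)]
      have hnn : (0 : Int) ≤ ((L : Int) - (sn : Int) - 1) / (en : Int) :=
        Int.ediv_nonneg (by omega) (by omega)
      have hcount : (((L : Int) - (sn : Int) + (en : Int) - 1) / (en : Int)).toNat - 1
          = (((L : Int) - ((sn : Int) + (en : Int)) + (en : Int) - 1) / (en : Int)).toNat := by
        rw [hnum, hdiv]; omega
      rw [← hcount]
      apply List.map_congr_left
      intro k _
      simp only [posP]; push_cast; ring
    · rw [if_neg hc]
      have hfd : PySem.Int.floordiv ((L : Int) - (sn : Int) + (en : Int) - 1) (en : Int) = 1 :=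
        (PySem.Int.floordiv_eq_iff_of_pos hepos).mpr ⟨by omega, by omega⟩
      rw [PySem.Int.floordiv_eq_ediv_of_pos hepos] at hfd
      rw [hfd]
      simp
  case _ =>
    intro k hk
    have hmem : ((posP sn en k : Nat) : Int) ∈ PySem.List.pyRange (sn : Int) (L : Int) (en : Int) := by
      rw [PySem.List.pyRange_of_pos _ _ hepos, if_pos (by exact_mod_cast hsL)]
      refine List.mem_map.mpr ⟨k, List.mem_range.mpr hk, ?_⟩
      simp only [posP]; push_cast; ring
    have := ((PySem.List.mem_pyRange_iff_of_pos hepos _).mp hmem).2.1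
    exact_mod_cast this

theorem pyRange_nil_of_nonpos (a b e : Int) (he : e ≤ -1) (hab : a ≤ b) :
    PySem.List.pyRange a b e = [] := by
  unfold PySem.List.pyRange
  rw [if_neg (by omega)]
  rw [if_neg (by omega), if_neg (by omega)]
  simp

theorem pyRange_nil_of_ge (a b e : Int) (he : 1 ≤ e) (hab : b ≤ a) :
    PySem.List.pyRange a b e = [] := by
  rw [PySem.List.pyRange_of_pos _ _ (by omega), if_neg (by omega)]
  simp

-- ---- main equivalence, main case ----
theorem main_case (l : List Int) (sn en : Nat) (hen : 1 ≤ en) (hse : sn < en)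
    (hsL : sn < l.length) :
    gapInsertion l (sn : Int) (en : Int) = gapInsertion_alt l (sn : Int) (en : Int) := by
  obtain ⟨N, hN1, hB, hA, hbound⟩ := ranges_eq sn en l.length hen hsL
  -- A's port computes passA
  have eqA : gapInsertion l (sn : Int) (en : Int) = passA sn en l (N - 1) := by
    unfold gapInsertion
    rw [hA]
    exact foldA_eq_passA sn en hen hse l (N - 1) (fun k hk => hbound (k + 1) (by omega))
  -- B's port computes scat of the sorted gathered values
  have eqB : gapInsertion_alt l (sn : Int) (en : Int)
      = scat l ((List.range N).map (posP sn en))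
          (PySem.List.sorted (gatherL l sn en N) (fun x => x) false) := by
    unfold gapInsertion_alt
    rw [hB]
    dsimp only
    rw [List.map_map]
    have hv : ((List.range N).map ((fun i => PySem.List.pyGetD l i 0)
        ∘ (fun k => ((posP sn en k : Nat) : Int)))) = gatherL l sn en N := by
      unfold gatherL
      apply List.map_congr_left
      intro k _
      simp [PySem.List.pyGetD_natCast]
    rw [hv]
    have hid : (List.range N).map (fun k => ((posP sn en k : Nat) : Int))
        = (((List.range N).map (posP sn en)).map (fun k : Nat => (k : Int))) := by
      rw [List.map_map]; rfl
    rw [hid]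
    exact foldB_eq_scat _ _ _
  rw [eqA, eqB]
  -- the invariant of A's pass, at the last iteration
  obtain ⟨hinv, huntouched⟩ := passA_invariant sn en hen l (N - 1) (fun k hk => hbound k (by omega))
  have hNsub : N - 1 + 1 = N := by omega
  rw [hNsub] at hinv
  have hsorted : PySem.List.sorted (gatherL l sn en N) (fun x => x) false
      = gatherL (passA sn en l (N - 1)) sn en N := by
    rw [sorted_eq_sortR_reverse, ← hinv, List.reverse_reverse]
  have hlenA : (passA sn en l (N - 1)).length = l.length := length_passA sn en l (N - 1)
  have hlenvs : (PySem.List.sorted (gatherL l sn en N) (fun x => x) false).length = N := by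
    rw [PySem.List.length_sorted, length_gatherL]
  have hlenB : (scat l ((List.range N).map (posP sn en))
      (PySem.List.sorted (gatherL l sn en N) (fun x => x) false)).length = l.length :=
    length_scat _ _ _
  apply List.ext_getElem (by rw [hlenA, hlenB])
  intro i hi1 hi2
  rw [← List.getD_eq_getElem _ 0 hi1, ← List.getD_eq_getElem _ 0 hi2]
  by_cases hmem : ∃ k, k < N ∧ i = posP sn en k
  · obtain ⟨k, hk, rfl⟩ := hmem
    -- A's side: the k-th gathered value
    have hg : (gatherL (passA sn en l (N - 1)) sn en N).getD k 0
        = (passA sn en l (N - 1)).getD (posP sn en k) 0 := by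
      unfold gatherL
      rw [List.getD_eq_getElem _ 0 (by simpa using hk)]
      simp
    -- B's side: scat writes the k-th sorted value at the k-th position
    have hks : (((List.range N).map (posP sn en))[k]'(by simpa using hk)) = posP sn en k := by
      simp
    have hkb := scat_getD_elem ((List.range N).map (posP sn en))
      (PySem.List.sorted (gatherL l sn en N) (fun x => x) false) l
      (List.Nodup.map (posP_injective sn en hen) (List.nodup_range))
      (by rw [hlenvs]; simp) k (by simpa using hk)
      (by rw [hks]; rw [hlenA] at hi1; exact hi1)
    rw [hks] at hkb
    rw [hkb, hsorted, hg]
  · push Not at hmem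
    have hBu : (scat l ((List.range N).map (posP sn en))
        (PySem.List.sorted (gatherL l sn en N) (fun x => x) false)).getD (i) 0 = l.getD i 0 := by
      apply scat_getD_not_mem
      intro hin
      obtain ⟨k, hk, hkeq⟩ := List.mem_map.mp hin
      exact hmem k (List.mem_range.mp hk) hkeq.symm
    have hAu : (passA sn en l (N - 1)).getD i 0 = l.getD i 0 :=
      huntouched i (fun t ht h => hmem t (by omega) h)
    rw [hAu, hBu]

-- both ports return l unchanged when their index ranges are empty
theorem trivial_both (l : List Int) (s e : Int)
    (hA : PySem.List.pyRange (s + e) (l.length : Int) e = [])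
    (hB : PySem.List.pyRange s (l.length : Int) e = []) :
    gapInsertion l s e = gapInsertion_alt l s e := by
  unfold gapInsertion gapInsertion_alt
  rw [hA, hB]
  rfl

-- ===== VERDICT (by name: the statement is the Claim_ definition above) =====
theorem gapInsertion_spec : Claim_equal_gapInsertion := by
  intro l s e _ hpre
  unfold Spec_gapInsertion
  rcases hpre with ⟨hs, he, hcase⟩ | ⟨he, hs⟩
  · obtain ⟨sn, rfl⟩ : ∃ sn : Nat, s = (sn : Int) := ⟨s.toNat, by omega⟩
    obtain ⟨en, rfl⟩ : ∃ en : Nat, e = (en : Int) := ⟨e.toNat, by omega⟩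
    have hen : 1 ≤ en := by exact_mod_cast he
    by_cases hsL : sn < l.length
    · rcases hcase with hlt | hge
      · exact main_case l sn en hen (by exact_mod_cast hlt) hsL
      · exfalso; omega
    · exact trivial_both l _ _ (pyRange_nil_of_ge _ _ _ he (by omega))
        (pyRange_nil_of_ge _ _ _ he (by omega))
  · exact trivial_both l _ _ (pyRange_nil_of_nonpos _ _ _ he (by omega))
      (pyRange_nil_of_nonpos _ _ _ he hs)
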